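-- pv_equiv track=rewrite | github.com/Edu-MS/Loteria | loteria.py | resultados
-- ===== SOURCE A (Python) =====
-- def resultados(uni, apostas, jogo):
--     """
--     Esta função retorna uma lista de acertos, correspondente a lista de apostas.
--     :param uni: Universo.
--     :param apostas: Jogos apostados.
--     :param jogo: Jogo realizado.
--     :return: Lista com os acertos de cada aposta realizada.
--     """
--     ap = len(apostas)
--     resultado = list(range(0, ap))
--     for indice, jogada in enumerate(apostas):
--         pontos = 0
--         for valor in uni:
--             if (valor in jogo) and (valor in jogada):
--                 pontos = pontos + 1
--         resultado[indice] = pontos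
--     return resultado
-- ===== SOURCE B (Python) =====
-- def resultados(uni, apostas, jogo):
--     # Inverted index: value -> list of bet indices whose bet contains that value.
--     index = {}
--     for i, jogada in enumerate(apostas):
--         for v in set(jogada):
--             index[v] = index.get(v, []) + [i]
--     jogo_set = set(jogo)
--     res = [0] * len(apostas)
--     for v in uni:
--         if v in jogo_set:
--             for i in index.get(v, []):
--                 res[i] += 1
--     return res
-- ===== Notes on version B (the rewrite author's own statement) =====
-- stated objective: faster
-- what changed: Replaces A's triply nested membership scans with an inverted index (a dict mapping each value to the list of bet indices containing it) built in one pass, then a single pass over the universe that increments a result vector at the indexed positions, so the per-bet inner scans disappear.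
import Mathlib
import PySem

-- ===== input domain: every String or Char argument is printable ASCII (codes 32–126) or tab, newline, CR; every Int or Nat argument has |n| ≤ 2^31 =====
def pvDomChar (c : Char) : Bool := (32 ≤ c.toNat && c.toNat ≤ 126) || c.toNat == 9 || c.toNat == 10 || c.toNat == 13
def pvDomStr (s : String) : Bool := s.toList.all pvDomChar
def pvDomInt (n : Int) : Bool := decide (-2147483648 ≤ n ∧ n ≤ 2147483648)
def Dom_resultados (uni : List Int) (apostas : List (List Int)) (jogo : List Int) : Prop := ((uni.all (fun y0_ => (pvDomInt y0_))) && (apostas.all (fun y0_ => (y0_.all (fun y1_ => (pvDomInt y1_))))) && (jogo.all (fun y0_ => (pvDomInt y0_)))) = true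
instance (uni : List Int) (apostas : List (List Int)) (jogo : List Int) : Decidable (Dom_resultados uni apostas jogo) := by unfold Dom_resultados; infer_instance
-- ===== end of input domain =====

-- B replaces A's triply nested membership scans by an inverted index (value -> bet
-- indices) built once, then one pass over the universe incrementing a result vector.

-- ===== PORT A =====
def resultados (uni : List Int) (apostas : List (List Int)) (jogo : List Int) : List Int :=
  let ap : Int := apostas.length
  let resultado := PySem.List.pyRange 0 ap 1
  (PySem.List.enumerate apostas 0).foldl
    (fun res p =>
      let pontos := uni.foldl
        (fun pts valor => if jogo.contains valor && p.2.contains valor then pts + 1 else pts)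
        (0 : Int)
      PySem.List.pySetD res p.1 pontos)
    resultado

-- ===== PORT B =====
-- 'for i, jogada in enumerate(apostas): for v in set(jogada): index[v] = index.get(v, []) + [i]'
def bIndex (apostas : List (List Int)) : PySem.Dict Int (List Int) :=
  (PySem.List.enumerate apostas 0).foldl
    (fun d p => (PySem.Set.ofList p.2).foldl
      (fun d v => PySem.Dict.modify d v [] (fun l => l ++ [p.1])) d)
    PySem.Dict.empty

-- 'for i in index.get(v, []): res[i] += 1'
def bInc (res : List Int) (idxs : List Int) : List Int :=
  idxs.foldl (fun r i => PySem.List.pySetD r i (PySem.List.pyGetD r i 0 + 1)) res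

def resultados_alt (uni : List Int) (apostas : List (List Int)) (jogo : List Int) : List Int :=
  let index := bIndex apostas
  let jogoSet := PySem.Set.ofList jogo
  uni.foldl
    (fun res v => if jogoSet.contains v then bInc res (index.getD v []) else res)
    (List.replicate apostas.length (0 : Int))

-- ===== PRECONDITION & SPEC =====
def Spec_resultados (uni : List Int) (apostas : List (List Int)) (jogo : List Int) (out : List Int) : Prop := out = resultados_alt uni apostas jogo
instance (uni : List Int) (apostas : List (List Int)) (jogo : List Int) (out : List Int) : Decidable (Spec_resultados uni apostas jogo out) := by unfold Spec_resultados; infer_instance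

-- ===== CLAIM (what is proved, stated in full; the proofs are below) =====
def Claim_equal_resultados : Prop := ∀ (uni : List Int) (apostas : List (List Int)) (jogo : List Int), Dom_resultados uni apostas jogo → Spec_resultados uni apostas jogo (resultados uni apostas jogo)

-- ===== LEMMAS AND PROOFS =====

-- the ideal content of the inverted index at key v: the (Int) indices of the bets containing v
def idxOf (v : Int) (apostas : List (List Int)) : List Int :=
  (PySem.List.enumerate apostas 0).flatMap (fun p => if p.2.contains v then [p.1] else [])

theorem count_ofList (xs : List Int) (v : Int) :
    (PySem.Set.ofList xs).count v = if xs.contains v then 1 else 0 := by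
  by_cases h : v ∈ xs
  · rw [if_pos (by simpa using h)]
    exact List.count_eq_one_of_mem (PySem.Set.nodup_ofList xs) ((PySem.Set.mem_ofList xs v).2 h)
  · rw [if_neg (by simpa using h), List.count_eq_zero]
    simpa [PySem.Set.mem_ofList]

theorem bIndex_getD (apostas : List (List Int)) (v : Int) :
    (bIndex apostas).getD v [] = idxOf v apostas := by
  unfold bIndex idxOf
  have h1 : ∀ (d : PySem.Dict Int (List Int)) (p : Int × List Int),
      (PySem.Set.ofList p.2).foldl (fun d v => PySem.Dict.modify d v [] (fun l => l ++ [p.1])) d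
        = ((PySem.Set.ofList p.2).map (fun w => (w, p.1))).foldl
            (fun d q => PySem.Dict.modify d q.1 [] (fun l => l ++ [q.2])) d := by
    intro d p; rw [List.foldl_map]
  simp only [h1]
  rw [← List.foldl_flatMap, PySem.Dict.getD_foldl_modify_append]
  rw [PySem.Dict.getD_empty, List.nil_append, List.filter_flatMap, List.map_flatMap]
  congr 1; funext p
  rw [List.filter_map]
  have : ((PySem.Set.ofList p.2).filter ((fun q => q.1 == v) ∘ (fun w => (w, p.1)))) =
      (PySem.Set.ofList p.2).filter (fun w => w == v) := rfl
  rw [this, List.filter_beq, count_ofList]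
  by_cases h : v ∈ p.2 <;> simp [h]

theorem bInc_length (res idxs : List Int) : (bInc res idxs).length = res.length := by
  unfold bInc
  induction idxs generalizing res with
  | nil => rfl
  | cons i is ih => rw [List.foldl_cons, ih, PySem.List.length_pySetD]

theorem getD_set_ite (res : List Int) (n k : Nat) (w : Int) (_hn : n < res.length) (hk : k < res.length) :
    (res.set n w).getD k 0 = if n = k then w else res.getD k 0 := by
  rw [List.getD_eq_getElem _ _ (by simpa using hk), List.getD_eq_getElem _ _ hk, List.getElem_set]

theorem bInc_getD (idxs : List Int) (res : List Int)
    (h : ∀ i ∈ idxs, 0 ≤ i ∧ i < (res.length : Int)) (k : Nat) (hk : k < res.length) :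
    (bInc res idxs).getD k 0 = res.getD k 0 + idxs.count (k : Int) := by
  induction idxs generalizing res with
  | nil => simp [bInc]
  | cons i is ih =>
    obtain ⟨h0, h1⟩ := h i (by simp)
    have hset : PySem.List.pySetD res i (PySem.List.pyGetD res i 0 + 1)
        = res.set i.toNat (res.getD i.toNat 0 + 1) := by
      rw [PySem.List.pySetD_of_nonneg res _ h0, PySem.List.pyGetD_eq_getElem res 0 h0 h1,
        List.getD_eq_getElem res 0 (by omega)]
    have hrec := ih (res.set i.toNat (res.getD i.toNat 0 + 1))
      (fun j hj => by rw [List.length_set]; exact h j (by simp [hj]))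
      (by rwa [List.length_set])
    have hgoal : bInc res (i :: is) = bInc (PySem.List.pySetD res i (PySem.List.pyGetD res i 0 + 1)) is := rfl
    rw [hgoal, hset, hrec, List.count_cons]
    rw [getD_set_ite res i.toNat k _ (by omega) hk]
    by_cases hik : i = (k : Int)
    · rw [if_pos (by omega)]
      simp [hik]
      omega
    · rw [if_neg (by omega)]
      simp [hik]

theorem idxOf_bounds (v : Int) (apostas : List (List Int)) :
    ∀ i ∈ idxOf v apostas, 0 ≤ i ∧ i < (apostas.length : Int) := by
  intro i hi
  unfold idxOf at hi
  obtain ⟨p, hp, hip⟩ := List.mem_flatMap.1 hi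
  obtain ⟨k, hk, rfl⟩ := (PySem.List.mem_enumerate_iff apostas 0 p).1 hp
  simp at hip
  obtain ⟨-, rfl⟩ := hip
  constructor <;> omega

theorem idxOf_count_aux (v : Int) (as : List (List Int)) :
    ∀ (s : Int) (k : Nat) (hk : k < as.length),
    ((PySem.List.enumerate as s).flatMap (fun p => if p.2.contains v then [p.1] else [])).count (s + (k : Int))
      = if (as[k]).contains v then 1 else 0 := by
  induction as with
  | nil => intro s k hk; simp at hk
  | cons a as ih =>
    intro s k hk
    rw [PySem.List.enumerate_cons, List.flatMap_cons, List.count_append]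
    have hbound : ∀ i ∈ (PySem.List.enumerate as (s+1)).flatMap (fun p => if p.2.contains v then [p.1] else []),
        s + 1 ≤ i := by
      intro i hi
      obtain ⟨p, hp, hip⟩ := List.mem_flatMap.1 hi
      obtain ⟨j, hj, rfl⟩ := (PySem.List.mem_enumerate_iff as (s+1) p).1 hp
      simp at hip
      obtain ⟨-, rfl⟩ := hip
      omega
    cases k with
    | zero =>
      have htail : ((PySem.List.enumerate as (s+1)).flatMap (fun p => if p.2.contains v then [p.1] else [])).count (s + ((0:Nat) : Int)) = 0 := by
        rw [List.count_eq_zero]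
        intro hmem
        have := hbound _ hmem; omega
      rw [htail]
      simp only [List.getElem_cons_zero]
      by_cases h : v ∈ a <;> simp [h]
    | succ k =>
      have hhead : (if a.contains v then [s] else ([] : List Int)).count (s + ((k+1 : Nat) : Int)) = 0 := by
        by_cases h : v ∈ a
        · simp [h, List.count_singleton]
          omega
        · simp [h]
      rw [hhead]
      have hrec := ih (s+1) k (by simpa using hk)
      simp only [List.getElem_cons_succ, Nat.zero_add]
      have hc : s + ((k+1 : Nat) : Int) = s + 1 + (k : Int) := by push_cast; ring
      rw [hc, hrec]
      rfl

theorem idxOf_count (v : Int) (apostas : List (List Int)) (k : Nat) (hk : k < apostas.length) :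
    (idxOf v apostas).count (k : Int) = if (apostas[k]).contains v then 1 else 0 := by
  have h := idxOf_count_aux v apostas 0 k hk
  unfold idxOf
  rw [← h]
  congr 1
  omega

theorem alt_loop (apostas : List (List Int)) (jogo : List Int) (uni : List Int) :
    ∀ res : List Int, res.length = apostas.length →
      (uni.foldl (fun res v => if (PySem.Set.ofList jogo).contains v then bInc res ((bIndex apostas).getD v []) else res) res).length = apostas.length ∧
      ∀ k : Nat, (hk : k < apostas.length) →
        (uni.foldl (fun res v => if (PySem.Set.ofList jogo).contains v then bInc res ((bIndex apostas).getD v []) else res) res).getD k 0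
          = res.getD k 0 + ((uni.countP (fun v => jogo.contains v && (apostas[k]'hk).contains v) : Nat) : Int) := by
  induction uni with
  | nil => intro res hres; simp [hres]
  | cons v uni ih =>
    intro res hres
    rw [List.foldl_cons]
    have hcont : (PySem.Set.ofList jogo).contains v = jogo.contains v := by
      simp [PySem.Set.contains_eq_listContains]
    by_cases hj : jogo.contains v = true
    · rw [if_pos (by rw [hcont]; exact hj), bIndex_getD]
      have hres' : (bInc res (idxOf v apostas)).length = apostas.length := by
        rw [bInc_length]; exact hres
      obtain ⟨hl, hg⟩ := ih (bInc res (idxOf v apostas)) hres'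
      refine ⟨hl, fun k hk => ?_⟩
      rw [hg k hk, bInc_getD (idxOf v apostas) res
        (by rw [hres]; exact idxOf_bounds v apostas) k (by omega),
        idxOf_count v apostas k hk, List.countP_cons]
      simp only [hj, Bool.true_and]
      simp
      ring
    · rw [if_neg (by rw [hcont]; exact hj)]
      obtain ⟨hl, hg⟩ := ih res hres
      refine ⟨hl, fun k hk => ?_⟩
      rw [hg k hk, List.countP_cons]
      simp only [hj, Bool.false_and, if_neg Bool.false_ne_true, Nat.add_zero]


-- A's outer loop: writing f a into slot s, for each (s, a) of enumerate as s, replaces the suffix by as.map f.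
theorem outer_loop (f : List Int → Int) (as : List (List Int)) :
    ∀ (s : Nat) (res : List Int), res.length = s + as.length →
    (PySem.List.enumerate as (s : Int)).foldl (fun r p => PySem.List.pySetD r p.1 (f p.2)) res
      = res.take s ++ as.map f := by
  induction as with
  | nil =>
    intro s res h
    simp only [List.length_nil, Nat.add_zero] at h
    simp [PySem.List.enumerate_nil, List.take_of_length_le (Nat.le_of_eq h)]
  | cons a as ih =>
    intro s res h
    simp only [List.length_cons] at h
    have hs : s < res.length := by omega
    rw [PySem.List.enumerate_cons, List.foldl_cons]
    have hcast : ((s : Int) + 1) = ((s + 1 : Nat) : Int) := by push_cast; ring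
    rw [hcast, PySem.List.pySetD_natCast res s (f a),
      ih (s + 1) _ (by rw [List.length_set]; omega)]
    have htake : (res.set s (f a)).take (s + 1) = res.take s ++ [f a] := by
      rw [List.take_set, List.take_add_one, List.getElem?_eq_getElem hs,
        Option.toList_some, List.set_append_right _ _ (by rw [List.length_take]; omega)]
      have hz : s - (res.take s).length = 0 := by rw [List.length_take]; omega
      rw [hz, List.set_cons_zero]
    rw [htake, List.map_cons, List.append_assoc, List.singleton_append]

-- ===== VERDICT (by name: the statement is the Claim_ definition above) =====
theorem resultados_spec : Claim_equal_resultados := by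
  intro uni apostas jogo _
  unfold Spec_resultados resultados resultados_alt
  have hA := outer_loop (fun jogada => uni.foldl
      (fun pts valor => if jogo.contains valor && jogada.contains valor then pts + 1 else pts)
      (0 : Int)) apostas 0
      (PySem.List.pyRange 0 (apostas.length : Int) 1)
      (by rw [PySem.List.length_pyRange_one]; simp)
  simp only [Nat.cast_zero] at hA
  rw [hA]
  obtain ⟨hl, hg⟩ := alt_loop apostas jogo uni (List.replicate apostas.length (0 : Int)) (by simp)
  apply List.ext_getElem
  · simp only [List.take_zero, List.nil_append, List.length_map]
    exact hl.symm
  · intro k h1 h2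
    have hk : k < apostas.length := by simpa using h1
    rw [← List.getD_eq_getElem _ 0 h2]
    rw [hg k hk]
    simp only [List.take_zero, List.nil_append] at *
    rw [List.getElem_map]
    rw [PySem.List.foldl_count_if (fun valor => jogo.contains valor && (apostas[k]'hk).contains valor) uni 0]
    simp
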